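-- pv_equiv track=rewrite | github.com/RvMerle/advent_of_code | 2025/day04/code.py | part2
-- ===== SOURCE A (Python) =====
-- def part1(diagram: list[str]) -> tuple[list[str], int]:
--     res = []
--     count = 0
--     for i in range(len(diagram)):
--         row = ""
--         for j in range(len(diagram[0])):
--             if diagram[i][j] == "@" and (
--                 sum(
--                     int(diagram[k][l] == "@")
--                     for k in range(max(i - 1, 0), min(i + 2, len(diagram)))
--                     for l in range(max(j - 1, 0), min(j + 2, len(diagram[0])))
--                 )
--                 <= 4
--             ):
--                 row += "."
--                 count += 1
--             else:
--                 row += diagram[i][j]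
--         res.append(row)
--
--     return res, count
--
-- def part2(diagram: list[str]) -> int:
--     total_count = 0
--     prev_diagram = []
--     new_diagram = diagram
--     while new_diagram != prev_diagram:
--         prev_diagram = new_diagram
--         new_diagram, count = part1(new_diagram)
--         total_count += count
--     return total_count
-- ===== SOURCE B (Python) =====
-- # Worklist erosion: instead of synchronous full-grid rounds, remove unstable
-- # '@' cells one at a time from a stack, re-examining only the neighbours of
-- # each removed cell; the final stable set (and hence the removal count) is the
-- # same greatest fixpoint, reached in O(h*w) amortised work.
-- NBR = [(-1, -1), (-1, 0), (-1, 1), (0, -1), (0, 0), (0, 1), (1, -1), (1, 0), (1, 1)]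
--
-- def part2(diagram):
--     if not diagram:
--         return 0
--     w = len(diagram[0])
--     cells = [(i, j) for i in range(len(diagram)) for j in range(w) if diagram[i][j] == "@"]
--     live = set(cells)
--     stack = cells[:]
--     removed = 0
--     while stack:
--         i, j = stack.pop()
--         if (i, j) not in live:
--             continue
--         if sum((i + di, j + dj) in live for di, dj in NBR) > 4:
--             continue
--         live.remove((i, j))
--         removed += 1
--         for di, dj in NBR:
--             if (di, dj) != (0, 0):
--                 stack.append((i + di, j + dj))
--     return removed
-- ===== Notes on version B (the rewrite author's own statement) =====
-- stated objective: faster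
-- what changed: B replaces A's synchronous rounds (rebuild the whole grid each round until it stops changing) by an asynchronous worklist: unstable '@' cells are popped off a stack and removed one at a time, pushing only the 8 neighbours of each removed cell for re-examination; since the removal condition is monotone the worklist reaches the same greatest fixpoint, so the removal counts agree.
import Mathlib
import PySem

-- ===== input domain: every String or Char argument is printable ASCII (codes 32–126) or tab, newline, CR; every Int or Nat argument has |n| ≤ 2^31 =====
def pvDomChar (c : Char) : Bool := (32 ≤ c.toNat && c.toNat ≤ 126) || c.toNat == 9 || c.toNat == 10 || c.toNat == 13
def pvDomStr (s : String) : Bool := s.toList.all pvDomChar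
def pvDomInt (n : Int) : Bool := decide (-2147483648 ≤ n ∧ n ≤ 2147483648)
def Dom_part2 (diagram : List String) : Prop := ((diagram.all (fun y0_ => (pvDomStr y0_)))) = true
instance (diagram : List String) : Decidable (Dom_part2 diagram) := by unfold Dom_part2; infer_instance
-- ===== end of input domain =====

-- B replaces A's synchronous full-grid rounds by an asynchronous worklist that removes
-- unstable '@' cells one at a time, re-examining only neighbours of removed cells;
-- the removal counts agree because both reach the same greatest fixpoint.

-- ===== PORT A =====
-- A works on the rows as lists of characters (strings are ported through List Char, per PySem).
-- diagram[i][j] : the '.' / [] defaults are never read under Pre_ (indices are in range there).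
def chA (g : List (List Char)) (i j : Int) : Char :=
  PySem.List.pyGetD (PySem.List.pyGetD g i []) j '.'

-- the generator-sum in A's removal condition
def nbrSumA (g : List (List Char)) (h w i j : Int) : Int :=
  ((PySem.List.pyRange (max (i - 1) 0) (min (i + 2) h) 1).map (fun k =>
    ((PySem.List.pyRange (max (j - 1) 0) (min (j + 2) w) 1).map (fun l =>
      if chA g k l = '@' then (1 : Int) else 0)).sum)).sum

def part1 (g : List (List Char)) : List (List Char) × Int :=
  let h : Int := g.length
  let w : Int := (PySem.List.pyGetD g 0 []).length
  (PySem.List.pyRange 0 h 1).foldl (fun (acc : List (List Char) × Int) i =>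
    let rc := (PySem.List.pyRange 0 w 1).foldl (fun (rc : List Char × Int) j =>
      if chA g i j = '@' ∧ nbrSumA g h w i j ≤ 4 then (rc.1 ++ ['.'], rc.2 + 1)
      else (rc.1 ++ [chA g i j], rc.2)) ([], acc.2)
    (acc.1 ++ [rc.1], rc.2)) ([], 0)

-- number of '@' characters in the whole grid (used only as a fuel bound)
def atCount (g : List (List Char)) : Nat :=
  (g.map (fun r => r.countP (fun c => c = '@'))).sum

-- A's while-loop, restructured as the equivalent do-while (the loop body always runs once when
-- diagram ≠ []).  The fuel `atCount g + 2` is a termination guard only, never exhausted: each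
-- round that changes the grid after the first removes at least one '@'.
def part2go : Nat → List (List Char) → Int → Int
  | 0, _, total => total
  | fuel + 1, g, total =>
    let r := part1 g
    if r.1 = g then total + r.2 else part2go fuel r.1 (total + r.2)

def part2 (diagram : List String) : Int :=
  if diagram = [] then 0
  else part2go (atCount (diagram.map (fun s => s.toList)) + 2)
        (diagram.map (fun s => s.toList)) 0

-- ===== PORT B =====
-- the module constant NBR
def nbrList : List (Int × Int) :=
  [(-1, -1), (-1, 0), (-1, 1), (0, -1), (0, 0), (0, 1), (1, -1), (1, 0), (1, 1)]

-- diagram[i][j] on B's side (same in-range caveat as chA)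
def chB (diagram : List String) (i j : Int) : Char :=
  PySem.List.pyGetD (PySem.List.pyGetD diagram i "").toList j '.'

-- the list comprehension `cells`
def cellsB (diagram : List String) (w : Int) : List (Int × Int) :=
  (PySem.List.pyRange 0 (diagram.length : Int) 1).flatMap (fun i =>
    (PySem.List.pyRange 0 w 1).filterMap (fun j =>
      if chB diagram i j = '@' then some (i, j) else none))

-- sum((i + di, j + dj) in live for di, dj in NBR)
def nbrCntB (live : PySem.Set (Int × Int)) (i j : Int) : Int :=
  (nbrList.map (fun o => if PySem.Set.contains live (i + o.1, j + o.2) then (1 : Int) else 0)).sum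

-- the neighbours pushed after a removal (the inner for-loop over NBR minus (0,0))
def pushB (i j : Int) : List (Int × Int) :=
  nbrList.filterMap (fun o => if o ≠ ((0 : Int), (0 : Int)) then some (i + o.1, j + o.2) else none)

-- needed by wlLoop's termination proof
theorem discard_length_lt (s : PySem.Set (Int × Int)) (x : Int × Int) (h : x ∈ s) :
    (PySem.Set.discard s x).length < s.length := by
  simp only [PySem.Set.discard]
  refine List.length_filter_lt_length_iff_exists.2 ⟨x, h, ?_⟩
  simp

-- the while-loop: pop the last element (stack.pop()); `live.remove` is guarded by the
-- membership test just above it, so it never raises and equals Set.discard there.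
def wlLoop (live : PySem.Set (Int × Int)) (stack : List (Int × Int)) (removed : Int) : Int :=
  if hs : stack = [] then removed
  else
    let c := stack.getLast hs
    let rest := stack.dropLast
    if hin : PySem.Set.contains live c = false then wlLoop live rest removed
    else if 4 < nbrCntB live c.1 c.2 then wlLoop live rest removed
    else wlLoop (PySem.Set.discard live c) (rest ++ pushB c.1 c.2) (removed + 1)
termination_by 9 * live.length + stack.length
decreasing_by
  · have : 0 < stack.length := List.length_pos_iff.2 hs
    simp [List.length_dropLast]; omega
  · have : 0 < stack.length := List.length_pos_iff.2 hs
    simp [List.length_dropLast]; omega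
  · have hmem : stack.getLast hs ∈ live :=
      (PySem.Set.contains_iff _ _).1 (by simpa using hin)
    have h1 := discard_length_lt live (stack.getLast hs) hmem
    have h2 : (pushB (stack.getLast hs).1 (stack.getLast hs).2).length = 8 := by
      simp [pushB, nbrList]
    have : 0 < stack.length := List.length_pos_iff.2 hs
    simp only [List.length_append, List.length_dropLast, h2]
    omega

def part2_alt (diagram : List String) : Int :=
  if diagram = [] then 0
  else
    let w : Int := ((PySem.List.pyGetD diagram 0 "").toList.length : Int)
    let cells := cellsB diagram w
    wlLoop (PySem.Set.ofList cells) cells 0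

-- ===== PRECONDITION & SPEC =====
-- Pre_ excludes exactly the inputs where the Python A raises IndexError (and B raises too):
-- a non-empty diagram containing a row shorter than the first row.
def Pre_part2 (diagram : List String) : Prop :=
  diagram = [] ∨ ∀ s ∈ diagram, (diagram.headD "").toList.length ≤ s.toList.length
instance (diagram : List String) : Decidable (Pre_part2 diagram) := by
  unfold Pre_part2; infer_instance

def pvWitness_part2 : List String := ["@@.", "@@@", ".@@"]

def Spec_part2 (diagram : List String) (out : Int) : Prop := out = part2_alt diagram
instance (diagram : List String) (out : Int) : Decidable (Spec_part2 diagram out) := by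
  unfold Spec_part2; infer_instance

-- ===== CLAIM (what is proved, stated in full; the proofs are below) =====
def Claim_equal_part2 : Prop :=
  ∀ (diagram : List String), Dom_part2 diagram → Pre_part2 diagram →
    Spec_part2 diagram (part2 diagram)

-- ===== LEMMAS AND PROOFS =====

-- ---- abbreviations used only by the proofs ----

def widthL (g : List (List Char)) : Int := ((PySem.List.pyGetD g 0 []).length : Int)

-- the canonical (row-major) list of live '@' coordinates of a grid
def liveG (g : List (List Char)) (w : Int) : List (Int × Int) :=
  (PySem.List.pyRange 0 (g.length : Int) 1).flatMap (fun i =>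
    (PySem.List.pyRange 0 w 1).filterMap (fun j =>
      if chA g i j = '@' then some (i, j) else none))

def keepP (S : List (Int × Int)) : (Int × Int) → Bool :=
  fun c => decide (4 < nbrCntB S c.1 c.2)

def keepF (S : List (Int × Int)) : List (Int × Int) := S.filter (keepP S)

-- the synchronous reference loop: one round = keep exactly the stable cells (this is the
-- per-round behaviour A's part1 has on the live coordinates; proved in live_gridN below)
def stepB (live : PySem.Set (Int × Int)) : PySem.Set (Int × Int) :=
  PySem.Set.ofList (live.filter (fun c => decide (4 < nbrCntB live c.1 c.2)))

theorem stepB_length_le (live : PySem.Set (Int × Int)) : (stepB live).length ≤ live.length :=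
  le_trans (PySem.Set.length_ofList_le _) (List.length_filter_le _ _)

def bLoop (live : PySem.Set (Int × Int)) : PySem.Set (Int × Int) :=
  let keep := stepB live
  if keep.length = live.length then live else bLoop keep
termination_by live.length
decreasing_by
  exact lt_of_le_of_ne (stepB_length_le live) (by simpa using (by assumption : ¬ _))

def rowF (g : List (List Char)) (h w i : Int) : List Char :=
  (PySem.List.pyRange 0 w 1).map (fun j =>
    if chA g i j = '@' ∧ nbrSumA g h w i j ≤ 4 then '.' else chA g i j)

def gridN (g : List (List Char)) (h w : Int) : List (List Char) :=
  (PySem.List.pyRange 0 h 1).map (rowF g h w)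

def cntN (g : List (List Char)) (h w : Int) : Nat :=
  ((PySem.List.pyRange 0 h 1).map (fun i =>
    ((PySem.List.pyRange 0 w 1).filter (fun j =>
      decide (chA g i j = '@' ∧ nbrSumA g h w i j ≤ 4))).length)).sum

def indI (S : List (Int × Int)) (k l : Int) : Int := if (k, l) ∈ S then 1 else 0

-- ---- fold shapes of part1 ----

theorem sum_map_natCast {α : Type} (xs : List α) (f : α → Nat) :
    (xs.map (fun x => ((f x : Nat) : Int))).sum = (((xs.map f).sum : Nat) : Int) := by
  induction xs with
  | nil => simp
  | cons x xs ih => simp [ih]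

theorem fold_inner (g : List (List Char)) (h w i : Int) (xs : List Int) :
    ∀ (acc : List Char) (n : Int),
    xs.foldl (fun (rc : List Char × Int) j =>
        if chA g i j = '@' ∧ nbrSumA g h w i j ≤ 4 then (rc.1 ++ ['.'], rc.2 + 1)
        else (rc.1 ++ [chA g i j], rc.2)) (acc, n)
      = (acc ++ xs.map (fun j =>
            if chA g i j = '@' ∧ nbrSumA g h w i j ≤ 4 then '.' else chA g i j),
         n + ((xs.filter (fun j =>
            decide (chA g i j = '@' ∧ nbrSumA g h w i j ≤ 4))).length : Int)) := by
  induction xs with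
  | nil => intro acc n; simp
  | cons x xs ih =>
    intro acc n
    rw [List.foldl_cons, List.map_cons, List.filter_cons]
    by_cases hx : chA g i x = '@' ∧ nbrSumA g h w i x ≤ 4
    · have hb : decide (chA g i x = '@' ∧ nbrSumA g h w i x ≤ 4) = true := by simp [hx]
      rw [if_pos hx, if_pos hx, hb, if_pos rfl, ih]
      rw [Prod.mk.injEq]
      refine ⟨by simp, ?_⟩
      rw [List.length_cons]
      push_cast
      ring
    · have hb : decide (chA g i x = '@' ∧ nbrSumA g h w i x ≤ 4) = false := by simp [hx]
      rw [if_neg hx, if_neg hx, hb, ih]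
      rw [Prod.mk.injEq]
      refine ⟨by simp, by simp⟩

theorem fold_outer (g : List (List Char)) (h w : Int) (xs : List Int) :
    ∀ (acc : List (List Char)) (n : Int),
    xs.foldl (fun (acc : List (List Char) × Int) i =>
        let rc := (PySem.List.pyRange 0 w 1).foldl (fun (rc : List Char × Int) j =>
          if chA g i j = '@' ∧ nbrSumA g h w i j ≤ 4 then (rc.1 ++ ['.'], rc.2 + 1)
          else (rc.1 ++ [chA g i j], rc.2)) ([], acc.2)
        (acc.1 ++ [rc.1], rc.2)) (acc, n)
      = (acc ++ xs.map (rowF g h w),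
         n + (xs.map (fun i => (((PySem.List.pyRange 0 w 1).filter (fun j =>
            decide (chA g i j = '@' ∧ nbrSumA g h w i j ≤ 4))).length : Int))).sum) := by
  induction xs with
  | nil => intro acc n; simp
  | cons x xs ih =>
    intro acc n
    rw [List.foldl_cons, List.map_cons, List.map_cons, List.sum_cons]
    show List.foldl _ (acc ++ [((PySem.List.pyRange 0 w 1).foldl _ ([], n)).1],
      ((PySem.List.pyRange 0 w 1).foldl _ ([], n)).2) xs = _
    rw [fold_inner]
    rw [ih]
    rw [Prod.mk.injEq]
    constructor
    · simp [rowF]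
    · simp; ring

theorem part1_eq (g : List (List Char)) :
    part1 g = (gridN g (g.length : Int) (widthL g), (cntN g (g.length : Int) (widthL g) : Int)) := by
  unfold part1
  rw [fold_outer]
  rw [Prod.mk.injEq]
  constructor
  · simp [gridN, widthL]
  · rw [zero_add]
    exact (sum_map_natCast (PySem.List.pyRange 0 (g.length : Int) 1)
      (fun i => ((PySem.List.pyRange 0 (widthL g) 1).filter (fun j =>
        decide (chA g i j = '@' ∧ nbrSumA g (g.length : Int) (widthL g) i j ≤ 4))).length)).trans
      rfl

-- ---- the live set: membership, nodup, filters ----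

theorem filterMap_if_comp {α β : Type} (xs : List α) (Q : β → Prop) [DecidablePred Q]
    (e : α → β) :
    xs.filterMap (fun x => if Q (e x) then some (e x) else none)
      = (xs.map e).filter (fun b => decide (Q b)) := by
  induction xs with
  | nil => simp
  | cons x xs ih =>
    simp only [List.filterMap_cons, List.map_cons, List.filter_cons]
    by_cases hx : Q (e x) <;> simp [hx, ih]

theorem length_filterMap_if {α β : Type} (xs : List α) (P : α → Prop) [DecidablePred P]
    (e : α → β) :
    (xs.filterMap (fun x => if P x then some (e x) else none)).length
      = (xs.filter (fun x => decide (P x))).length := by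
  induction xs with
  | nil => simp
  | cons x xs ih =>
    simp only [List.filterMap_cons, List.filter_cons]
    by_cases hx : P x <;> simp [hx, ih]

theorem filter_filterMap_if {α β : Type} (xs : List α) (P : α → Prop) [DecidablePred P]
    (e : α → β) (p : β → Bool) :
    (xs.filterMap (fun x => if P x then some (e x) else none)).filter p
      = xs.filterMap (fun x => if P x ∧ p (e x) = true then some (e x) else none) := by
  induction xs with
  | nil => simp
  | cons x xs ih =>
    simp only [List.filterMap_cons]
    by_cases hx : P x
    · by_cases hp : p (e x) = true
      · simp [hx, hp, ih]
      · simp [hx, hp, ih]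
    · simp [hx, ih]

theorem liveG_mem (g : List (List Char)) (w : Int) (a : Int × Int) :
    a ∈ liveG g w ↔
      0 ≤ a.1 ∧ a.1 < (g.length : Int) ∧ 0 ≤ a.2 ∧ a.2 < w ∧ chA g a.1 a.2 = '@' := by
  obtain ⟨i, j⟩ := a
  simp only [liveG, List.mem_flatMap, List.mem_filterMap, PySem.List.mem_pyRange_one]
  constructor
  · rintro ⟨k, hk, l, hl, hc⟩
    by_cases hq : chA g k l = '@'
    · rw [if_pos hq] at hc
      have hkl := Option.some.inj hc
      rw [Prod.mk.injEq] at hkl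
      obtain ⟨rfl, rfl⟩ := hkl
      exact ⟨hk.1, hk.2, hl.1, hl.2, hq⟩
    · rw [if_neg hq] at hc
      cases hc
  · rintro ⟨h1, h2, h3, h4, h5⟩
    exact ⟨i, ⟨h1, h2⟩, j, ⟨h3, h4⟩, by simp [h5]⟩

theorem liveG_eq_filter (g : List (List Char)) (w : Int) :
    liveG g w = ((PySem.List.pyRange 0 (g.length : Int) 1).flatMap (fun i =>
        (PySem.List.pyRange 0 w 1).map (fun j => (i, j)))).filter
        (fun c => decide (chA g c.1 c.2 = '@')) := by
  rw [liveG, List.filter_flatMap]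
  refine List.flatMap_congr ?_
  intro i _
  exact filterMap_if_comp _ (fun c : Int × Int => chA g c.1 c.2 = '@') (fun j => (i, j))

theorem liveG_nodup (g : List (List Char)) (w : Int) : (liveG g w).Nodup := by
  rw [liveG_eq_filter]
  refine List.Nodup.filter _ ?_
  have he : ((PySem.List.pyRange 0 (g.length : Int) 1).flatMap (fun i =>
      (PySem.List.pyRange 0 w 1).map (fun j => (i, j))))
      = PySem.List.pyRange 0 (g.length : Int) 1 ×ˢ PySem.List.pyRange 0 w 1 := rfl
  rw [he]
  exact List.Nodup.product (PySem.List.nodup_pyRange_one _ _) (PySem.List.nodup_pyRange_one _ _)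

theorem liveG_filter (g : List (List Char)) (w : Int) (p : Int × Int → Bool) :
    (liveG g w).filter p = (PySem.List.pyRange 0 (g.length : Int) 1).flatMap (fun i =>
      (PySem.List.pyRange 0 w 1).filterMap (fun j =>
        if chA g i j = '@' ∧ p (i, j) = true then some (i, j) else none)) := by
  rw [liveG, List.filter_flatMap]
  refine List.flatMap_congr ?_
  intro i _
  exact filter_filterMap_if _ _ _ p

-- ---- neighbour counting: A's clipped double sum = B's offset membership sum ----

theorem indI_out (g : List (List Char)) (w k l : Int)
    (hkl : k < 0 ∨ (g.length : Int) ≤ k ∨ l < 0 ∨ w ≤ l) : indI (liveG g w) k l = 0 := by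
  unfold indI
  rw [if_neg]
  intro hmem
  rw [liveG_mem] at hmem
  omega

theorem nbrCntB_eq_sum (S : List (Int × Int)) (i j : Int) :
    nbrCntB S i j = (nbrList.map (fun o => indI S (i + o.1) (j + o.2))).sum := by
  unfold nbrCntB indI
  refine congrArg List.sum (List.map_congr_left ?_)
  intro o _
  simp [PySem.Set.contains_eq_listContains]

theorem count_eq (g : List (List Char)) (w i j : Int)
    (hi : 0 ≤ i) (hi2 : i < (g.length : Int)) (hj : 0 ≤ j) (hj2 : j < w) :
    nbrSumA g (g.length : Int) w i j = nbrCntB (liveG g w) i j := by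
  -- Step 1: rewrite A's summand as indI
  have step1 : nbrSumA g (g.length : Int) w i j
      = ((PySem.List.pyRange (max (i - 1) 0) (min (i + 2) (g.length : Int)) 1).map (fun k =>
          ((PySem.List.pyRange (max (j - 1) 0) (min (j + 2) w) 1).map (fun l =>
            indI (liveG g w) k l)).sum)).sum := by
    unfold nbrSumA
    refine congrArg List.sum (List.map_congr_left ?_)
    intro k hk
    refine congrArg List.sum (List.map_congr_left ?_)
    intro l hl
    rw [PySem.List.mem_pyRange_one] at hk hl
    unfold indI
    by_cases hc : chA g k l = '@'
    · rw [if_pos hc, if_pos]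
      rw [liveG_mem]
      exact ⟨by omega, by omega, by omega, by omega, hc⟩
    · rw [if_neg hc, if_neg]
      intro hmem
      rw [liveG_mem] at hmem
      exact hc hmem.2.2.2.2
  -- Step 2: inner clipped sum = inner full sum (for any k)
  have step2 : ∀ k : Int,
      ((PySem.List.pyRange (max (j - 1) 0) (min (j + 2) w) 1).map (fun l =>
        indI (liveG g w) k l)).sum
      = ((PySem.List.pyRange (j - 1) (j + 2) 1).map (fun l => indI (liveG g w) k l)).sum := by
    intro k
    rw [PySem.List.pyRange_one_append (j - 1) (max (j - 1) 0) (j + 2) (by omega) (by omega),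
        PySem.List.pyRange_one_append (max (j - 1) 0) (min (j + 2) w) (j + 2) (by omega) (by omega)]
    simp only [List.map_append, List.sum_append]
    have hlow : ((PySem.List.pyRange (j - 1) (max (j - 1) 0) 1).map (fun l =>
        indI (liveG g w) k l)).sum = 0 := by
      refine List.sum_eq_zero ?_
      intro x hx
      simp only [List.mem_map] at hx
      obtain ⟨l, hl, rfl⟩ := hx
      rw [PySem.List.mem_pyRange_one] at hl
      exact indI_out g w k l (by omega)
    have hhigh : ((PySem.List.pyRange (min (j + 2) w) (j + 2) 1).map (fun l =>
        indI (liveG g w) k l)).sum = 0 := by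
      refine List.sum_eq_zero ?_
      intro x hx
      simp only [List.mem_map] at hx
      obtain ⟨l, hl, rfl⟩ := hx
      rw [PySem.List.mem_pyRange_one] at hl
      exact indI_out g w k l (by omega)
    rw [hlow, hhigh]
    ring
  -- Step 3: outer clipped sum = outer full sum
  have hinner0 : ∀ k : Int, (k < 0 ∨ (g.length : Int) ≤ k) →
      ((PySem.List.pyRange (j - 1) (j + 2) 1).map (fun l => indI (liveG g w) k l)).sum = 0 := by
    intro k hk
    refine List.sum_eq_zero ?_
    intro x hx
    simp only [List.mem_map] at hx
    obtain ⟨l, _, rfl⟩ := hx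
    exact indI_out g w k l (by omega)
  have step3 : nbrSumA g (g.length : Int) w i j
      = ((PySem.List.pyRange (i - 1) (i + 2) 1).map (fun k =>
          ((PySem.List.pyRange (j - 1) (j + 2) 1).map (fun l =>
            indI (liveG g w) k l)).sum)).sum := by
    rw [step1]
    have e : ((PySem.List.pyRange (max (i - 1) 0) (min (i + 2) (g.length : Int)) 1).map (fun k =>
        ((PySem.List.pyRange (max (j - 1) 0) (min (j + 2) w) 1).map (fun l =>
          indI (liveG g w) k l)).sum)).sum
        = ((PySem.List.pyRange (max (i - 1) 0) (min (i + 2) (g.length : Int)) 1).map (fun k =>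
          ((PySem.List.pyRange (j - 1) (j + 2) 1).map (fun l =>
            indI (liveG g w) k l)).sum)).sum := by
      refine congrArg List.sum (List.map_congr_left ?_)
      intro k _
      exact step2 k
    rw [e]
    rw [PySem.List.pyRange_one_append (i - 1) (max (i - 1) 0) (i + 2) (by omega) (by omega),
        PySem.List.pyRange_one_append (max (i - 1) 0) (min (i + 2) (g.length : Int)) (i + 2)
          (by omega) (by omega)]
    simp only [List.map_append, List.sum_append]
    have hlow : ((PySem.List.pyRange (i - 1) (max (i - 1) 0) 1).map (fun k =>
        ((PySem.List.pyRange (j - 1) (j + 2) 1).map (fun l => indI (liveG g w) k l)).sum)).sum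
        = 0 := by
      refine List.sum_eq_zero ?_
      intro x hx
      simp only [List.mem_map] at hx
      obtain ⟨k, hk, rfl⟩ := hx
      rw [PySem.List.mem_pyRange_one] at hk
      exact hinner0 k (by omega)
    have hhigh : ((PySem.List.pyRange (min (i + 2) (g.length : Int)) (i + 2) 1).map (fun k =>
        ((PySem.List.pyRange (j - 1) (j + 2) 1).map (fun l => indI (liveG g w) k l)).sum)).sum
        = 0 := by
      refine List.sum_eq_zero ?_
      intro x hx
      simp only [List.mem_map] at hx
      obtain ⟨k, hk, rfl⟩ := hx
      rw [PySem.List.mem_pyRange_one] at hk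
      exact hinner0 k (by omega)
    rw [hlow, hhigh]
    ring
  -- Step 4: expand both 3×3 sums
  rw [step3, nbrCntB_eq_sum]
  have er1 : PySem.List.pyRange (i - 1) (i + 2) 1 = [i - 1, i, i + 1] := by
    rw [PySem.List.pyRange_one_cons (by omega), PySem.List.pyRange_one_cons (by omega),
        PySem.List.pyRange_one_cons (by omega), PySem.List.pyRange_one_eq_nil (by omega)]
    norm_num
  have er2 : PySem.List.pyRange (j - 1) (j + 2) 1 = [j - 1, j, j + 1] := by
    rw [PySem.List.pyRange_one_cons (by omega), PySem.List.pyRange_one_cons (by omega),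
        PySem.List.pyRange_one_cons (by omega), PySem.List.pyRange_one_eq_nil (by omega)]
    norm_num
  rw [er1, er2]
  simp only [nbrList, List.map_cons, List.map_nil, List.sum_cons, List.sum_nil]
  have a1 : i + (-1 : Int) = i - 1 := by ring
  have a2 : j + (-1 : Int) = j - 1 := by ring
  have a3 : i + (0 : Int) = i := by ring
  have a4 : j + (0 : Int) = j := by ring
  rw [a1, a2, a3, a4]
  ring

-- ---- the next grid ----

theorem chA_gridN (g : List (List Char)) (w i j : Int)
    (hi : 0 ≤ i) (hi2 : i < (g.length : Int)) (hj : 0 ≤ j) (hj2 : j < w) (hw : 0 ≤ w) :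
    chA (gridN g (g.length : Int) w) i j
      = if chA g i j = '@' ∧ nbrSumA g (g.length : Int) w i j ≤ 4 then '.' else chA g i j := by
  unfold chA gridN
  have hiN : i = ((i.toNat : Nat) : Int) := (Int.toNat_of_nonneg hi).symm
  have hjN : j = ((j.toNat : Nat) : Int) := (Int.toNat_of_nonneg hj).symm
  have hwN : w = ((w.toNat : Nat) : Int) := (Int.toNat_of_nonneg hw).symm
  rw [hiN, PySem.List.pyGetD_map_pyRange (rowF g (g.length : Int) w) g.length i.toNat []
    (by omega)]
  unfold rowF
  rw [hwN, hjN, PySem.List.pyGetD_map_pyRange _ w.toNat j.toNat '.' (by omega)]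
  rw [← hiN, ← hjN, ← hwN]
  rfl

theorem gridN_length (g : List (List Char)) (w : Int) :
    (gridN g (g.length : Int) w).length = g.length := by
  unfold gridN
  rw [List.length_map, PySem.List.length_pyRange_one]
  omega

theorem gridN_rows (g : List (List Char)) (w : Int) :
    ∀ r ∈ gridN g (g.length : Int) w, r.length = w.toNat := by
  intro r hr
  unfold gridN at hr
  obtain ⟨i, _, rfl⟩ := List.mem_map.1 hr
  unfold rowF
  rw [List.length_map, PySem.List.length_pyRange_one]
  omega

theorem widthL_gridN (g : List (List Char)) (w : Int) (hne' : g ≠ []) (hw : 0 ≤ w) :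
    widthL (gridN g (g.length : Int) w) = w := by
  unfold widthL gridN
  have hlen : (0 : Int) < (g.length : Int) := by
    have : 0 < g.length := List.length_pos_iff.2 hne'
    omega
  rw [PySem.List.pyRange_one_cons hlen, List.map_cons, PySem.List.pyGetD_ofNat',
    List.getD_cons_zero]
  unfold rowF
  rw [List.length_map, PySem.List.length_pyRange_one]
  omega

theorem live_gridN (g : List (List Char)) (w : Int) (hw : 0 ≤ w) :
    liveG (gridN g (g.length : Int) w) w = keepF (liveG g w) := by
  rw [keepF, liveG_filter]
  conv_lhs => rw [liveG]
  rw [show (((gridN g (g.length : Int) w).length : Nat) : Int) = ((g.length : Nat) : Int) by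
    rw [gridN_length]]
  refine List.flatMap_congr ?_
  intro i hi
  rw [PySem.List.mem_pyRange_one] at hi
  refine List.filterMap_congr ?_
  intro j hj
  rw [PySem.List.mem_pyRange_one] at hj
  have hg := chA_gridN g w i j (by omega) (by omega) (by omega) (by omega) hw
  have hcnt := count_eq g w i j (by omega) (by omega) (by omega) (by omega)
  by_cases hc : chA g i j = '@'
  · by_cases hrem : nbrSumA g (g.length : Int) w i j ≤ 4
    · have hg' : chA (gridN g (g.length : Int) w) i j = '.' := by
        rw [hg, if_pos ⟨hc, hrem⟩]
      rw [hg', if_neg (by decide : ¬ ('.' = '@')), if_neg]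
      rintro ⟨-, hp⟩
      simp only [keepP, decide_eq_true_eq] at hp
      omega
    · have hg' : chA (gridN g (g.length : Int) w) i j = chA g i j := by
        rw [hg, if_neg (fun hx => hrem hx.2)]
      rw [hg', if_pos hc, if_pos]
      refine ⟨hc, ?_⟩
      simp only [keepP, decide_eq_true_eq]
      omega
  · have hg' : chA (gridN g (g.length : Int) w) i j = chA g i j := by
      rw [hg, if_neg (fun hx => hc hx.1)]
    rw [hg', if_neg hc, if_neg (fun hx => hc hx.1)]

theorem gridN_eq_self (g : List (List Char))
    (hrect : ∀ r ∈ g, (r.length : Int) = widthL g)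
    (hnorem : ∀ i j : Int, 0 ≤ i → i < (g.length : Int) → 0 ≤ j → j < widthL g →
      ¬(chA g i j = '@' ∧ nbrSumA g (g.length : Int) (widthL g) i j ≤ 4)) :
    gridN g (g.length : Int) (widthL g) = g := by
  unfold gridN
  conv_rhs => rw [← PySem.List.map_pyGetD_pyRange_zero' g []]
  refine List.map_congr_left ?_
  intro i hi
  rw [PySem.List.mem_pyRange_one] at hi
  unfold rowF
  have hrowmem : PySem.List.pyGetD g i [] ∈ g := by
    rw [PySem.List.pyGetD_eq_getElem g [] hi.1 hi.2]
    exact List.getElem_mem _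
  have hrlen : ((PySem.List.pyGetD g i []).length : Int) = widthL g := hrect _ hrowmem
  have he : (PySem.List.pyRange 0 (widthL g) 1).map (fun j =>
      if chA g i j = '@' ∧ nbrSumA g (g.length : Int) (widthL g) i j ≤ 4 then '.'
      else chA g i j)
      = (PySem.List.pyRange 0 (widthL g) 1).map (fun j => chA g i j) := by
    refine List.map_congr_left ?_
    intro j hj
    rw [PySem.List.mem_pyRange_one] at hj
    rw [if_neg (hnorem i j hi.1 hi.2 hj.1 hj.2)]
  rw [he]
  show (PySem.List.pyRange 0 (widthL g) 1).map
    (fun j => PySem.List.pyGetD (PySem.List.pyGetD g i []) j '.') = _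
  rw [← hrlen]
  exact PySem.List.map_pyGetD_pyRange_zero' (PySem.List.pyGetD g i []) '.'

-- ---- counting ----

theorem live_len_split (g : List (List Char)) :
    (liveG g (widthL g)).length
      = (keepF (liveG g (widthL g))).length + cntN g (g.length : Int) (widthL g) := by
  rw [keepF, liveG_filter]
  conv_lhs => rw [liveG]
  unfold cntN
  rw [List.length_flatMap, List.length_flatMap, ← List.sum_map_add]
  refine congrArg List.sum (List.map_congr_left ?_)
  intro i hi
  rw [PySem.List.mem_pyRange_one] at hi
  rw [length_filterMap_if _ (fun j => chA g i j = '@') (fun j => (i, j)),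
      length_filterMap_if _
        (fun j => chA g i j = '@' ∧ keepP (liveG g (widthL g)) (i, j) = true)
        (fun j => (i, j))]
  have hsplit := List.length_eq_length_filter_add
    (f := fun j => keepP (liveG g (widthL g)) (i, j))
    (l := (PySem.List.pyRange 0 (widthL g) 1).filter (fun j => decide (chA g i j = '@')))
  rw [List.filter_filter, List.filter_filter] at hsplit
  have e1 : ((PySem.List.pyRange 0 (widthL g) 1).filter (fun j =>
      decide (chA g i j = '@' ∧ keepP (liveG g (widthL g)) (i, j) = true))).length
      = ((PySem.List.pyRange 0 (widthL g) 1).filter (fun a =>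
        keepP (liveG g (widthL g)) (i, a) && decide (chA g i a = '@'))).length := by
    refine congrArg List.length (List.filter_congr ?_)
    intro j _
    simp [Bool.and_comm]
  have e2 : ((PySem.List.pyRange 0 (widthL g) 1).filter (fun j =>
      decide (chA g i j = '@' ∧ nbrSumA g (g.length : Int) (widthL g) i j ≤ 4))).length
      = ((PySem.List.pyRange 0 (widthL g) 1).filter (fun a =>
        !keepP (liveG g (widthL g)) (i, a) && decide (chA g i a = '@'))).length := by
    refine congrArg List.length (List.filter_congr ?_)
    intro j hj
    rw [PySem.List.mem_pyRange_one] at hj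
    have hcnt := count_eq g (widthL g) i j (by omega) (by omega) (by omega) (by omega)
    simp only [keepP]
    by_cases hc : chA g i j = '@'
    · simp only [hc, decide_true, Bool.and_true, true_and]
      by_cases hk : 4 < nbrCntB (liveG g (widthL g)) i j
      · have : ¬ nbrSumA g (g.length : Int) (widthL g) i j ≤ 4 := by omega
        simp [this, hk]
      · have : nbrSumA g (g.length : Int) (widthL g) i j ≤ 4 := by omega
        simp [this, hk]
    · simp [hc]
  rw [e1, e2]
  omega

-- the number of live cells is at most the number of '@' characters (fuel bound)

theorem posCount (m : Nat) (r : List Char) :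
    ((List.range m).filter (fun (j : Nat) =>
        decide (PySem.List.pyGetD r ((j : Nat) : Int) '.' = '@'))).length
      = (r.take m).countP (fun c => decide (c = '@')) := by
  induction m with
  | zero => simp
  | succ m ih =>
    rw [List.range_succ, List.filter_append, List.length_append, ih, List.take_add_one,
      List.countP_append]
    have hval : PySem.List.pyGetD r ((m : Nat) : Int) '.' = r[m]?.getD '.' := by
      rw [PySem.List.pyGetD_natCast, List.getD_eq_getElem?_getD]
    have hsing : ((List.filter (fun (j : Nat) =>
        decide (PySem.List.pyGetD r ((j : Nat) : Int) '.' = '@')) [m]).length)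
        = List.countP (fun c => decide (c = '@')) r[m]?.toList := by
      rw [List.filter_singleton]
      by_cases hm : m < r.length
      · rw [List.getElem?_eq_getElem hm] at hval ⊢
        by_cases hc : r[m] = '@'
        · simp [hval, hc]
        · simp [hval, hc]
      · rw [List.getElem?_eq_none (show r.length ≤ m by omega)] at hval ⊢
        simp [hval]
    omega

theorem map_F_pyGetD {α β : Type} (xs : List α) (d : α) (F : α → β) :
    (PySem.List.pyRange 0 (xs.length : Int) 1).map (fun i => F (PySem.List.pyGetD xs i d))
      = xs.map F := by
  conv_rhs => rw [← PySem.List.map_pyGetD_pyRange_zero' xs d]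
  rw [List.map_map]
  rfl

theorem live_le_atCount (g : List (List Char)) :
    (liveG g (widthL g)).length ≤ atCount g := by
  have h1 : (liveG g (widthL g)).length
      = ((PySem.List.pyRange 0 (g.length : Int) 1).map (fun i =>
          ((PySem.List.pyRange 0 (widthL g) 1).filter (fun j =>
            decide (chA g i j = '@'))).length)).sum := by
    rw [liveG, List.length_flatMap]
    refine congrArg List.sum (List.map_congr_left ?_)
    intro i _
    exact length_filterMap_if _ (fun j => chA g i j = '@') (fun j => (i, j))
  have h2 : ((PySem.List.pyRange 0 (g.length : Int) 1).map (fun i =>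
          ((PySem.List.pyRange 0 (widthL g) 1).filter (fun j =>
            decide (chA g i j = '@'))).length)).sum
      = (g.map (fun r => ((PySem.List.pyRange 0 (widthL g) 1).filter (fun (j : Int) =>
          decide (PySem.List.pyGetD r j '.' = '@'))).length)).sum := by
    exact congrArg List.sum (map_F_pyGetD g []
      (fun r => ((PySem.List.pyRange 0 (widthL g) 1).filter (fun (j : Int) =>
        decide (PySem.List.pyGetD r j '.' = '@'))).length))
  rw [h1, h2]
  unfold atCount
  refine List.sum_le_sum ?_
  intro r _
  have h3 : ((PySem.List.pyRange 0 (widthL g) 1).filter (fun (j : Int) =>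
      decide (PySem.List.pyGetD r j '.' = '@'))).length
      = ((List.range (PySem.List.pyGetD g 0 []).length).filter (fun (j : Nat) =>
          decide (PySem.List.pyGetD r ((j : Nat) : Int) '.' = '@'))).length := by
    unfold widthL
    rw [PySem.List.pyRange_zero_natCast, List.filter_map, List.length_map]
    rfl
  rw [h3, posCount]
  exact List.Sublist.countP_le (List.take_sublist _ _)

-- ---- the synchronous loop: fixpoint characterisation ----

theorem stepB_eq_keepF (S : List (Int × Int)) (hS : S.Nodup) : stepB S = keepF S := by
  unfold stepB keepF keepP
  exact PySem.Set.ofList_eq_self_of_nodup _ (List.Nodup.filter _ hS)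

theorem bLoop_unfold (S : PySem.Set (Int × Int)) :
    bLoop S = if (stepB S).length = S.length then S else bLoop (stepB S) := by
  rw [bLoop]

theorem nbrCnt_mono (X S : List (Int × Int)) (hXS : ∀ a ∈ X, a ∈ S) (i j : Int) :
    nbrCntB X i j ≤ nbrCntB S i j := by
  unfold nbrCntB
  refine List.sum_le_sum ?_
  intro o _
  by_cases hm : (i + o.1, j + o.2) ∈ X
  · have hs := hXS _ hm
    simp [PySem.Set.contains_eq_listContains, hm, hs]
  · simp only [PySem.Set.contains_eq_listContains]
    by_cases hs : (i + o.1, j + o.2) ∈ S <;> simp [hm, hs]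

theorem keepF_mono (X S : List (Int × Int)) (hXS : ∀ a ∈ X, a ∈ S) :
    ∀ a ∈ keepF X, a ∈ keepF S := by
  intro a ha
  rw [keepF, List.mem_filter] at ha ⊢
  refine ⟨hXS _ ha.1, ?_⟩
  have h1 := ha.2
  simp only [keepP, decide_eq_true_eq] at h1 ⊢
  have := nbrCnt_mono X S hXS a.1 a.2
  omega

theorem bLoop_subset (S : PySem.Set (Int × Int)) : ∀ a ∈ bLoop S, a ∈ S := by
  induction hn : S.length using Nat.strong_induction_on generalizing S with
  | _ n ih =>
    rw [bLoop_unfold]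
    by_cases hl : (stepB S).length = S.length
    · rw [if_pos hl]; exact fun a ha => ha
    · rw [if_neg hl]
      intro a ha
      have hlt : (stepB S).length < n := by
        have := stepB_length_le S; omega
      have h1 := ih _ hlt (stepB S) rfl a ha
      unfold stepB at h1
      have h2 := (PySem.Set.mem_ofList _ _).1 h1
      exact (List.mem_filter.1 h2).1

theorem bLoop_nodup (S : PySem.Set (Int × Int)) (hS : S.Nodup) : (bLoop S).Nodup := by
  induction hn : S.length using Nat.strong_induction_on generalizing S with
  | _ n ih =>
    rw [bLoop_unfold]
    by_cases hl : (stepB S).length = S.length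
    · rw [if_pos hl]; exact hS
    · rw [if_neg hl]
      have hlt : (stepB S).length < n := by
        have := stepB_length_le S; omega
      exact ih _ hlt (stepB S) (PySem.Set.nodup_ofList _) rfl

theorem bLoop_fix (S : PySem.Set (Int × Int)) (hS : S.Nodup) : keepF (bLoop S) = bLoop S := by
  induction hn : S.length using Nat.strong_induction_on generalizing S with
  | _ n ih =>
    rw [bLoop_unfold]
    by_cases hl : (stepB S).length = S.length
    · rw [if_pos hl]
      rw [stepB_eq_keepF S hS] at hl
      exact (List.filter_sublist (l := S)).eq_of_length hl
    · rw [if_neg hl]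
      have hlt : (stepB S).length < n := by
        have := stepB_length_le S; omega
      exact ih _ hlt (stepB S) (PySem.Set.nodup_ofList _) rfl

theorem bLoop_greatest (S : PySem.Set (Int × Int)) (X : List (Int × Int))
    (hfix : keepF X = X) (hXS : ∀ a ∈ X, a ∈ S) : ∀ a ∈ X, a ∈ bLoop S := by
  induction hn : S.length using Nat.strong_induction_on generalizing S with
  | _ n ih =>
    rw [bLoop_unfold]
    by_cases hl : (stepB S).length = S.length
    · rw [if_pos hl]; exact hXS
    · rw [if_neg hl]
      have hlt : (stepB S).length < n := by
        have := stepB_length_le S; omega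
      refine ih _ hlt (stepB S) ?_ rfl
      intro a ha
      have h1 : a ∈ keepF S := keepF_mono X S hXS a (by rw [hfix]; exact ha)
      unfold stepB
      exact (PySem.Set.mem_ofList _ _).2 (by exact h1)

-- ---- the discard step preserves the fixpoint ----

theorem mem_discard_iff (S : List (Int × Int)) (c a : Int × Int) :
    a ∈ PySem.Set.discard S c ↔ a ∈ S ∧ a ≠ c := PySem.Set.mem_discard S c a

theorem nodup_sub_length (X Y : List (Int × Int)) (hX : X.Nodup)
    (h : ∀ a ∈ X, a ∈ Y) : X.length ≤ Y.length :=
  List.Subperm.length_le (List.Nodup.subperm hX h)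

theorem bLoop_discard_len (S : PySem.Set (Int × Int)) (hS : S.Nodup) (c : Int × Int)
    (_hc : c ∈ S) (hcnt : nbrCntB S c.1 c.2 ≤ 4) :
    (bLoop (PySem.Set.discard S c)).length = (bLoop S).length := by
  have hSd : (PySem.Set.discard S c).Nodup := PySem.Set.nodup_discard S c hS
  -- bLoop S avoids c
  have hLsub := bLoop_subset S
  have hLfix := bLoop_fix S hS
  have hcL : c ∉ bLoop S := by
    intro hmem
    have h1 : c ∈ keepF (bLoop S) := by rw [hLfix]; exact hmem
    have h2 := (List.mem_filter.1 h1).2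
    simp only [keepP, decide_eq_true_eq] at h2
    have := nbrCnt_mono (bLoop S) S hLsub c.1 c.2
    omega
  -- bLoop S ⊆ discard S c, hence ⊆ bLoop (discard S c)
  have h1 : ∀ a ∈ bLoop S, a ∈ bLoop (PySem.Set.discard S c) := by
    refine bLoop_greatest _ _ hLfix ?_
    intro a ha
    rw [mem_discard_iff]
    exact ⟨hLsub a ha, fun he => hcL (he ▸ ha)⟩
  -- bLoop (discard S c) ⊆ S, fixpoint, hence ⊆ bLoop S
  have h2 : ∀ a ∈ bLoop (PySem.Set.discard S c), a ∈ bLoop S := by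
    refine bLoop_greatest _ _ (bLoop_fix _ hSd) ?_
    intro a ha
    exact ((mem_discard_iff S c a).1 (bLoop_subset _ a ha)).1
  have hl1 := nodup_sub_length _ _ (bLoop_nodup S hS) h1
  have hl2 := nodup_sub_length _ _ (bLoop_nodup _ hSd) h2
  omega

theorem discard_length (S : List (Int × Int)) (hS : S.Nodup) (c : Int × Int) (hc : c ∈ S) :
    (PySem.Set.discard S c).length + 1 = S.length := by
  simp only [PySem.Set.discard]
  have hsplit := List.length_eq_length_filter_add (l := S) (f := fun y => y == c)
  have h1 : (S.filter (fun y => y == c)).length = 1 := by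
    rw [← List.countP_eq_length_filter]
    simpa [List.count] using List.count_eq_one_of_mem hS hc
  omega

-- ---- the worklist loop computes |S| − |bLoop S| ----

theorem nbrCnt_discard_eq (S : List (Int × Int)) (c : Int × Int) (i j : Int)
    (hne : ∀ o ∈ nbrList, (i + o.1, j + o.2) ≠ c) :
    nbrCntB (PySem.Set.discard S c) i j = nbrCntB S i j := by
  unfold nbrCntB
  refine congrArg List.sum (List.map_congr_left ?_)
  intro o ho
  have h1 : ((i + o.1, j + o.2) ∈ PySem.Set.discard S c) ↔ ((i + o.1, j + o.2) ∈ S) := by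
    rw [mem_discard_iff]
    exact ⟨fun h => h.1, fun h => ⟨h, hne o ho⟩⟩
  by_cases hm : (i + o.1, j + o.2) ∈ S
  · rw [(PySem.Set.contains_iff _ _).2 hm, (PySem.Set.contains_iff _ _).2 (h1.2 hm)]
  · have hd : (i + o.1, j + o.2) ∉ PySem.Set.discard S c := fun h => hm (h1.1 h)
    have e1 : PySem.Set.contains S (i + o.1, j + o.2) = false := by
      rw [← Bool.not_eq_true]; exact fun h => hm ((PySem.Set.contains_iff _ _).1 h)
    have e2 : PySem.Set.contains (PySem.Set.discard S c) (i + o.1, j + o.2) = false := by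
      rw [← Bool.not_eq_true]; exact fun h => hd ((PySem.Set.contains_iff _ _).1 h)
    rw [e1, e2]

theorem mem_pushB (c a : Int × Int) (o : Int × Int) (ho : o ∈ nbrList)
    (hoz : o ≠ ((0 : Int), (0 : Int))) (ha : (a.1 + o.1, a.2 + o.2) = c) :
    a ∈ pushB c.1 c.2 := by
  unfold pushB
  rw [List.mem_filterMap]
  refine ⟨(-o.1, -o.2), ?_, ?_⟩
  · -- nbrList is closed under negation
    fin_cases ho <;> simp_all <;> decide
  · have hoz' : ((-o.1 : Int), (-o.2 : Int)) ≠ ((0 : Int), (0 : Int)) := by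
      intro h
      rw [Prod.mk.injEq] at h
      exact hoz (by rw [Prod.ext_iff]; constructor <;> [omega; omega])
    rw [if_pos hoz']
    refine congrArg some ?_
    obtain ⟨a1, a2⟩ := a
    obtain ⟨c1, c2⟩ := c
    simp only [Prod.mk.injEq] at ha ⊢
    omega

theorem wl_eq (live : PySem.Set (Int × Int)) (stack : List (Int × Int)) (removed : Int)
    (hnd : live.Nodup)
    (hinv : ∀ a ∈ live, nbrCntB live a.1 a.2 ≤ 4 → a ∈ stack) :
    wlLoop live stack removed
      = removed + (live.length : Int) - ((bLoop live).length : Int) := by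
  induction hm : 9 * live.length + stack.length using Nat.strong_induction_on
      generalizing live stack removed with
  | _ n ih =>
    rw [wlLoop]
    by_cases hs : stack = []
    · rw [dif_pos hs]
      -- every live cell is stable ⇒ bLoop live = live
      have hall : keepF live = live := by
        refine List.filter_eq_self.2 ?_
        intro a ha
        simp only [keepP, decide_eq_true_eq]
        by_contra hle
        have := hinv a ha (by omega)
        rw [hs] at this
        cases this
      have hfix : bLoop live = live := by
        rw [bLoop_unfold, stepB_eq_keepF live hnd, hall, if_pos rfl]
      rw [hfix]
      ring
    · rw [dif_neg hs]
      have hstack : stack.dropLast ++ [stack.getLast hs] = stack :=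
        List.dropLast_append_getLast hs
      have hlpos : 0 < stack.length := List.length_pos_iff.2 hs
      set c := stack.getLast hs with hc
      by_cases hin : PySem.Set.contains live c = false
      · rw [dif_pos hin]
        have hcn : c ∉ live := by
          intro h
          rw [(PySem.Set.contains_iff _ _).2 h] at hin
          cases hin
        refine ih _ (by simp [List.length_dropLast]; omega) live _ removed hnd ?_ rfl
        intro a ha hle
        have h1 := hinv a ha hle
        rw [← hstack] at h1
        rcases List.mem_append.1 h1 with h2 | h2
        · exact h2
        · exfalso
          rcases List.mem_singleton.1 h2 with rfl
          exact hcn ha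
      · rw [dif_neg hin]
        have hcm : c ∈ live := (PySem.Set.contains_iff _ _).1 (by simpa using hin)
        by_cases hbig : 4 < nbrCntB live c.1 c.2
        · rw [if_pos hbig]
          refine ih _ (by simp [List.length_dropLast]; omega) live _ removed hnd ?_ rfl
          intro a ha hle
          have h1 := hinv a ha hle
          rw [← hstack] at h1
          rcases List.mem_append.1 h1 with h2 | h2
          · exact h2
          · exfalso
            rcases List.mem_singleton.1 h2 with rfl
            omega
        · rw [if_neg hbig]
          have hlen := discard_length live hnd c hcm
          have hnd' : (PySem.Set.discard live c).Nodup := PySem.Set.nodup_discard live c hnd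
          have hinv' : ∀ a ∈ PySem.Set.discard live c,
              nbrCntB (PySem.Set.discard live c) a.1 a.2 ≤ 4 →
                a ∈ stack.dropLast ++ pushB c.1 c.2 := by
            intro a ha hle
            obtain ⟨haS, hac⟩ := (mem_discard_iff live c a).1 ha
            by_cases hold : nbrCntB live a.1 a.2 ≤ 4
            · have h1 := hinv a haS hold
              rw [← hstack] at h1
              rcases List.mem_append.1 h1 with h2 | h2
              · exact List.mem_append.2 (Or.inl h2)
              · exfalso
                rcases List.mem_singleton.1 h2 with rfl
                exact hac rfl
            · -- the count dropped: some neighbour offset hits c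
              have hex : ∃ o ∈ nbrList, (a.1 + o.1, a.2 + o.2) = c := by
                by_contra hno
                push_neg at hno
                have := nbrCnt_discard_eq live c a.1 a.2 hno
                omega
              obtain ⟨o, ho, hoc⟩ := hex
              have hoz : o ≠ ((0 : Int), (0 : Int)) := by
                intro h
                subst h
                simp only [add_zero] at hoc
                exact hac (by rw [← hoc])
              exact List.mem_append.2 (Or.inr (mem_pushB c a o ho hoz hoc))
          have hpl : (pushB c.1 c.2).length = 8 := by simp [pushB, nbrList]
          have hrec := ih (9 * (PySem.Set.discard live c).length
              + (stack.dropLast ++ pushB c.1 c.2).length)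
            (by simp only [List.length_append, List.length_dropLast, hpl]; omega)
            (PySem.Set.discard live c) (stack.dropLast ++ pushB c.1 c.2) (removed + 1)
            hnd' hinv' rfl
          rw [hrec, bLoop_discard_len live hnd c hcm (by omega)]
          have : ((PySem.Set.discard live c).length : Int) + 1 = (live.length : Int) := by
            exact_mod_cast congrArg (Nat.cast (R := Int)) hlen
          omega

-- ---- bridges between the two ports ----

theorem cellsB_eq (diagram : List String) :
    cellsB diagram ((PySem.List.pyGetD diagram 0 "").toList.length : Int)
      = liveG (diagram.map (fun s => s.toList))
          (widthL (diagram.map (fun s => s.toList))) := by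
  have hw : ((PySem.List.pyGetD diagram 0 "").toList.length : Int)
      = widthL (diagram.map (fun s => s.toList)) := by
    unfold widthL
    rw [show ([] : List Char) = "".toList from rfl,
      PySem.List.pyGetD_map (fun s : String => s.toList) diagram 0 ""]
  have hch : ∀ i j : Int, chB diagram i j = chA (diagram.map (fun s => s.toList)) i j := by
    intro i j
    unfold chB chA
    rw [show ([] : List Char) = "".toList from rfl,
      PySem.List.pyGetD_map (fun s : String => s.toList) diagram i ""]
  unfold cellsB liveG
  rw [hw]
  have hlen : ((diagram.map (fun s => s.toList)).length : Int) = (diagram.length : Int) := by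
    rw [List.length_map]
  rw [← hlen]
  refine List.flatMap_congr ?_
  intro i _
  refine List.filterMap_congr ?_
  intro j _
  rw [hch i j]

-- the grid (as char lists) is empty iff the diagram is
theorem map_toList_ne_nil (diagram : List String) (h : diagram ≠ []) :
    diagram.map (fun s => s.toList) ≠ [] := by
  simp [h]

-- ---- the A-side loop simulation (unchanged from the synchronous analysis) ----

theorem guard_iff (g : List (List Char)) (_hne : g ≠ [])
    (hrect : ∀ r ∈ g, (r.length : Int) = widthL g) :
    (gridN g (g.length : Int) (widthL g) = g ↔
      (keepF (liveG g (widthL g))).length = (liveG g (widthL g)).length) := by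
  have hw0 : (0 : Int) ≤ widthL g := by unfold widthL; omega
  constructor
  · intro hg
    have hl := live_gridN g (widthL g) hw0
    rw [hg] at hl
    rw [← hl]
  · intro hlen
    have hsub : (keepF (liveG g (widthL g))).Sublist (liveG g (widthL g)) :=
      List.filter_sublist
    have hSS : keepF (liveG g (widthL g)) = liveG g (widthL g) :=
      hsub.eq_of_length hlen
    have hall : ∀ c ∈ liveG g (widthL g), keepP (liveG g (widthL g)) c = true := by
      intro c hc
      by_contra hnc
      have hmemf : c ∈ keepF (liveG g (widthL g)) := by rw [hSS]; exact hc
      rw [keepF, List.mem_filter] at hmemf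
      exact hnc hmemf.2
    refine gridN_eq_self g hrect ?_
    intro i j hi hi2 hj hj2 hrem
    have hmem : (i, j) ∈ liveG g (widthL g) := by
      rw [liveG_mem]; exact ⟨hi, hi2, hj, hj2, hrem.1⟩
    have hk := hall _ hmem
    simp only [keepP, decide_eq_true_eq] at hk
    have hcnt := count_eq g (widthL g) i j hi hi2 hj hj2
    omega

theorem go_eq : ∀ (fuel : Nat) (g : List (List Char)) (total : Int), g ≠ [] →
    (∀ r ∈ g, (r.length : Int) = widthL g) →
    (liveG g (widthL g)).length < fuel →
    part2go fuel g total
      = total + ((liveG g (widthL g)).length : Int)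
          - ((bLoop (liveG g (widthL g))).length : Int) := by
  intro fuel
  induction fuel with
  | zero => intro g total _ _ hlt; omega
  | succ n ih =>
    intro g total hne hrect hlt
    have hw0 : (0 : Int) ≤ widthL g := by unfold widthL; omega
    simp only [part2go]
    rw [part1_eq]
    have hstep : stepB (liveG g (widthL g)) = keepF (liveG g (widthL g)) :=
      stepB_eq_keepF _ (liveG_nodup g (widthL g))
    have hsplit := live_len_split g
    rw [bLoop_unfold (liveG g (widthL g)), hstep]
    by_cases hguard : gridN g (g.length : Int) (widthL g) = g
    · have hlen : (keepF (liveG g (widthL g))).length = (liveG g (widthL g)).length :=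
        (guard_iff g hne hrect).1 hguard
      rw [if_pos hguard, if_pos hlen]
      have hz : cntN g (g.length : Int) (widthL g) = 0 := by omega
      rw [hz]
      push_cast
      ring
    · have hlen : ¬ (keepF (liveG g (widthL g))).length = (liveG g (widthL g)).length :=
        fun hl => hguard ((guard_iff g hne hrect).2 hl)
      rw [if_neg hguard, if_neg hlen]
      have hne' : gridN g (g.length : Int) (widthL g) ≠ [] := by
        intro hnil
        have hgl := gridN_length g (widthL g)
        rw [hnil] at hgl
        exact hne (List.length_eq_zero_iff.1 hgl.symm)
      have hwN : widthL (gridN g (g.length : Int) (widthL g)) = widthL g :=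
        widthL_gridN g (widthL g) hne hw0
      have hrect' : ∀ r ∈ gridN g (g.length : Int) (widthL g),
          (r.length : Int) = widthL (gridN g (g.length : Int) (widthL g)) := by
        intro r hr
        rw [hwN, gridN_rows g (widthL g) r hr]
        omega
      have hliveN : liveG (gridN g (g.length : Int) (widthL g))
          (widthL (gridN g (g.length : Int) (widthL g))) = keepF (liveG g (widthL g)) := by
        rw [hwN]
        exact live_gridN g (widthL g) hw0
      have hsub : (keepF (liveG g (widthL g))).Sublist (liveG g (widthL g)) :=
        List.filter_sublist
      have hlt' : (liveG (gridN g (g.length : Int) (widthL g))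
          (widthL (gridN g (g.length : Int) (widthL g)))).length < n := by
        rw [hliveN]
        have hle := hsub.length_le
        omega
      rw [ih (gridN g (g.length : Int) (widthL g)) _ hne' hrect' hlt', hliveN]
      push_cast
      omega

theorem part2go_succ (fuel : Nat) (g : List (List Char)) (total : Int) :
    part2go (fuel + 1) g total
      = if (part1 g).1 = g then total + (part1 g).2
        else part2go fuel (part1 g).1 (total + (part1 g).2) := rfl

-- the non-empty case of A's top level
theorem top_eq (g : List (List Char)) (hgne : g ≠ []) :
    part2go (atCount g + 2) g 0
      = ((liveG g (widthL g)).length : Int) - ((bLoop (liveG g (widthL g))).length : Int) := by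
  have hw0 : (0 : Int) ≤ widthL g := by unfold widthL; omega
  have hle : (liveG g (widthL g)).length ≤ atCount g := live_le_atCount g
  have hstep : stepB (liveG g (widthL g)) = keepF (liveG g (widthL g)) :=
    stepB_eq_keepF _ (liveG_nodup _ _)
  have hsplit := live_len_split g
  by_cases hguard : gridN g (g.length : Int) (widthL g) = g
  · have hrect : ∀ r ∈ g, (r.length : Int) = widthL g := by
      intro r hr
      rw [← hguard] at hr
      rw [gridN_rows _ _ r hr]
      omega
    rw [go_eq (atCount g + 2) g 0 hgne hrect (by omega)]
    ring
  · rw [show atCount g + 2 = (atCount g + 1) + 1 from rfl, part2go_succ, part1_eq]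
    dsimp only
    rw [if_neg hguard]
    have hne' : gridN g (g.length : Int) (widthL g) ≠ [] := by
      intro hnil
      have hgl := gridN_length g (widthL g)
      rw [hnil] at hgl
      exact hgne (List.length_eq_zero_iff.1 hgl.symm)
    have hwN : widthL (gridN g (g.length : Int) (widthL g)) = widthL g :=
      widthL_gridN g (widthL g) hgne hw0
    have hrect' : ∀ r ∈ gridN g (g.length : Int) (widthL g),
        (r.length : Int) = widthL (gridN g (g.length : Int) (widthL g)) := by
      intro r hr
      rw [hwN, gridN_rows _ _ r hr]
      omega
    have hliveN : liveG (gridN g (g.length : Int) (widthL g))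
        (widthL (gridN g (g.length : Int) (widthL g))) = keepF (liveG g (widthL g)) := by
      rw [hwN]
      exact live_gridN g (widthL g) hw0
    have hsub : (keepF (liveG g (widthL g))).Sublist (liveG g (widthL g)) :=
      List.filter_sublist
    have hlt' : (liveG (gridN g (g.length : Int) (widthL g))
        (widthL (gridN g (g.length : Int) (widthL g)))).length < atCount g + 1 := by
      rw [hliveN]
      have hle2 := hsub.length_le
      omega
    rw [go_eq (atCount g + 1) _ _ hne' hrect' hlt', hliveN]
    rw [bLoop_unfold (liveG g (widthL g)), hstep]
    by_cases hlen : (keepF (liveG g (widthL g))).length = (liveG g (widthL g)).length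
    · rw [if_pos hlen, hsub.eq_of_length hlen, bLoop_unfold (liveG g (widthL g)), hstep,
        if_pos hlen]
      have hz : cntN g (g.length : Int) (widthL g) = 0 := by omega
      rw [hz]
      ring
    · rw [if_neg hlen]
      omega

-- ===== VERDICT (by name: the statement is the Claim_ definition above) =====
set_option maxHeartbeats 1000000 in
theorem part2_spec : Claim_equal_part2 := by
  intro diagram _ _
  unfold Spec_part2 part2 part2_alt
  by_cases hd : diagram = []
  · subst hd; simp
  · rw [if_neg hd, if_neg hd]
    have hg := map_toList_ne_nil diagram hd
    set g := diagram.map (fun s => s.toList) with hgdef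
    have hc := cellsB_eq diagram
    have hnd : (cellsB diagram ((PySem.List.pyGetD diagram 0 "").toList.length : Int)).Nodup := by
      rw [hc]; exact liveG_nodup _ _
    have hof : PySem.Set.ofList (cellsB diagram
        ((PySem.List.pyGetD diagram 0 "").toList.length : Int))
        = cellsB diagram ((PySem.List.pyGetD diagram 0 "").toList.length : Int) :=
      PySem.Set.ofList_eq_self_of_nodup _ hnd
    have htop := top_eq g hg
    show part2go (atCount g + 2) g 0
      = wlLoop (PySem.Set.ofList (cellsB diagram _)) (cellsB diagram _) 0
    rw [htop, hof, hc]
    rw [wl_eq (liveG g (widthL g)) (liveG g (widthL g)) 0 (liveG_nodup _ _)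
      (fun a ha _ => ha)]
    ring
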